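-- pv_equiv track=rewrite | github.com/alis-khadka/llm_program_grader | dataset/solutions/21_22-1-1-python/R3NZURQV.py | calc
-- ===== SOURCE A (Python) =====
-- def calc(n):
--     a = 1
--     b = 2
--     while n > 0:
--         if n % 2 == 1:
--             a = (a * b) % 1000000007
--         b = (b * b) % 1000000007
--         n //= 2
--     return (a - 1) % 1000000007
-- ===== SOURCE B (Python) =====
-- MOD = 1000000007
--
-- def _mersenne(n):
--     # 2**n - 1 mod MOD for n >= 1, via M(2k) = M(k)*(M(k)+2), M(2k+1) = 2*M(2k)+1
--     if n == 1:
--         return 1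
--     t = _mersenne(n // 2)
--     t = t * (t + 2) % MOD
--     return t if n % 2 == 0 else (2 * t + 1) % MOD
--
-- def calc(n):
--     return _mersenne(n) if n > 0 else 0
-- ===== Notes on version B (the rewrite author's own statement) =====
-- stated objective: alternative
-- what changed: Instead of A's bottom-up binary-exponentiation loop over state a/b followed by subtracting 1, B recurses top-down on n computing the Mersenne value 2^n-1 mod p directly through the factorisation M(2k)=M(k)*(M(k)+2) and M(2k+1)=2*M(2k)+1, so no power is ever formed and nothing is subtracted at the end.
import Mathlib
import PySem

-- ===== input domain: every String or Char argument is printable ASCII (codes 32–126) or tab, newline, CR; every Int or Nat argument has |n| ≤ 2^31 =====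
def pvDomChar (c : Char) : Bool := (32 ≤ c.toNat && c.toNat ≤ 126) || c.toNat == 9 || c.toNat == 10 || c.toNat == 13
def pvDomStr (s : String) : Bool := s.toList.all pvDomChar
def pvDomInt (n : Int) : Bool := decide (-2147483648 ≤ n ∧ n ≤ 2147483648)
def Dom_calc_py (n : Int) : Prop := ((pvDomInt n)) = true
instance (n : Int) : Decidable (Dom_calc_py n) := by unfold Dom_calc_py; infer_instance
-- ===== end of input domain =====

-- B replaces A's binary-exponentiation loop by a top-down recursion on the Mersenne
-- recurrence M(2k)=M(k)(M(k)+2), M(2k+1)=2M(2k)+1; same values (alternative algorithm).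

-- ===== PORT A =====
-- A's while loop: state (a, b), n halved each iteration
def calcLoop (n a b : Int) : Int :=
  if h : n > 0 then
    calcLoop (PySem.Int.floordiv n 2)
      (if PySem.Int.mod n 2 = 1 then (a * b) % 1000000007 else a)
      ((b * b) % 1000000007)
  else
    (a - 1) % 1000000007
termination_by n.toNat
decreasing_by
  have := PySem.Int.floordiv_eq_ediv_of_pos (a := n) (b := 2) (by omega)
  omega

def calc_py (n : Int) : Int := calcLoop n 1 2

-- ===== PORT B =====
-- _mersenne(n): 2^n - 1 mod p for n ≥ 1, via the Mersenne recurrence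
-- Python's base case is n == 1; the guard is n ≤ 1 only to make the Lean recursion total
-- (calc only calls pyMersenne with n ≥ 1, where the two guards coincide)
def pyMersenne (n : Int) : Int :=
  if h : n ≤ 1 then 1
  else
    let t := pyMersenne (PySem.Int.floordiv n 2)
    let t := t * (t + 2) % 1000000007
    if PySem.Int.mod n 2 = 0 then t else (2 * t + 1) % 1000000007
termination_by n.toNat
decreasing_by
  have := PySem.Int.floordiv_eq_ediv_of_pos (a := n) (b := 2) (by omega)
  omega

def calc_py_alt (n : Int) : Int := if n > 0 then pyMersenne n else 0

-- ===== PRECONDITION & SPEC =====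
def Spec_calc_py (n : Int) (out : Int) : Prop := out = calc_py_alt n
instance (n : Int) (out : Int) : Decidable (Spec_calc_py n out) := by unfold Spec_calc_py; infer_instance

-- ===== CLAIM (what is proved, stated in full; the proofs are below) =====
def Claim_equal_calc_py : Prop := ∀ (n : Int), Dom_calc_py n → Spec_calc_py n (calc_py n)

-- ===== LEMMAS AND PROOFS =====

-- A's loop computes (a * b^n - 1) % M
theorem calcLoop_eq (n a b : Int) :
    calcLoop n a b = (a * b ^ n.toNat - 1) % 1000000007 := by
  induction n, a, b using calcLoop.induct with
  | case1 n a b h ih =>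
    rw [calcLoop, dif_pos h]
    simp only [dite_eq_ite] at ih
    rw [ih]
    have hfd : PySem.Int.floordiv n 2 = n / 2 := PySem.Int.floordiv_eq_ediv_of_pos (by omega)
    have hmod : PySem.Int.mod n 2 = n % 2 := PySem.Int.mod_eq_emod_of_pos (by omega)
    rw [hfd, hmod]
    have hb : (b * b) % 1000000007 ≡ b * b [ZMOD 1000000007] :=
      Int.emod_emod_of_dvd _ dvd_rfl
    have ha : (if n % 2 = 1 then (a * b) % 1000000007 else a)
        ≡ a * b ^ (n % 2).toNat [ZMOD 1000000007] := by
      by_cases hr : n % 2 = 1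
      · rw [if_pos hr, hr]
        exact (Int.emod_emod_of_dvd _ dvd_rfl).trans (by norm_num)
      · have hr0 : n % 2 = 0 := by omega
        rw [if_neg hr, hr0]
        simp
    have key : (if n % 2 = 1 then (a * b) % 1000000007 else a)
          * (((b * b) % 1000000007) ^ (n / 2).toNat)
        ≡ a * b ^ n.toNat [ZMOD 1000000007] := by
      calc (if n % 2 = 1 then (a * b) % 1000000007 else a)
            * (((b * b) % 1000000007) ^ (n / 2).toNat)
          ≡ (a * b ^ (n % 2).toNat) * ((b * b) ^ (n / 2).toNat) [ZMOD 1000000007] :=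
            ha.mul (hb.pow _)
        _ = a * b ^ n.toNat := by
            rw [show b * b = b ^ 2 by ring, ← pow_mul, mul_assoc, ← pow_add]
            congr 2
            omega
    exact key.sub_right 1
  | case2 n a b h =>
    rw [calcLoop, dif_neg h]
    have : n.toNat = 0 := by omega
    rw [this]
    ring_nf

-- unfolding pyMersenne one step for n > 1
theorem mersenne_step (n : Int) (h : ¬ n ≤ 1) :
    pyMersenne n =
      (if PySem.Int.mod n 2 = 0 then
        pyMersenne (PySem.Int.floordiv n 2) * (pyMersenne (PySem.Int.floordiv n 2) + 2) % 1000000007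
      else (2 * (pyMersenne (PySem.Int.floordiv n 2) * (pyMersenne (PySem.Int.floordiv n 2) + 2) % 1000000007) + 1) % 1000000007) := by
  rw [pyMersenne, dif_neg h]

-- the shared value t = m*(m+2) % M equals 2^(2k) - 1 % M when m = pyMersenne(n//2)
theorem mersenne_t_eq (n : Int) (h : ¬ n ≤ 1)
    (ih : 1 ≤ PySem.Int.floordiv n 2 →
      pyMersenne (PySem.Int.floordiv n 2) = (2 ^ (PySem.Int.floordiv n 2).toNat - 1) % 1000000007) :
    pyMersenne (PySem.Int.floordiv n 2) * (pyMersenne (PySem.Int.floordiv n 2) + 2) % 1000000007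
      = (2 ^ (2 * (PySem.Int.floordiv n 2).toNat) - 1) % 1000000007 := by
  have hfd : PySem.Int.floordiv n 2 = n / 2 := PySem.Int.floordiv_eq_ediv_of_pos (by omega)
  rw [ih (by rw [hfd]; omega)]
  set k := (PySem.Int.floordiv n 2).toNat
  have hm : ((2 : Int) ^ k - 1) % 1000000007 ≡ 2 ^ k - 1 [ZMOD 1000000007] :=
    Int.emod_emod_of_dvd _ dvd_rfl
  have hcong : ((2 ^ k - 1) % 1000000007) * ((2 ^ k - 1) % 1000000007 + 2)
      ≡ (2 ^ k - 1) * ((2 ^ k - 1) + 2) [ZMOD 1000000007] :=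
    hm.mul (hm.add_right 2)
  have h2 : ((2 : Int) ^ k - 1) * ((2 ^ k - 1) + 2) = 2 ^ (2 * k) - 1 := by
    rw [two_mul, pow_add]; ring
  simpa [h2] using hcong

-- B's recursion computes (2^n - 1) % M for n ≥ 1
theorem mersenne_eq (n : Int) :
    1 ≤ n → pyMersenne n = (2 ^ n.toNat - 1) % 1000000007 := by
  induction n using pyMersenne.induct with
  | case1 n h =>
    intro hn
    have h1 : n = 1 := by omega
    subst h1
    rw [pyMersenne]
    norm_num
  | case2 n h hp ih =>
    intro hn
    rw [mersenne_step n h, if_pos hp, mersenne_t_eq n h ih]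
    congr 1
    have hfd : PySem.Int.floordiv n 2 = n / 2 := PySem.Int.floordiv_eq_ediv_of_pos (by omega)
    have hp' : n % 2 = 0 := by rw [PySem.Int.mod_eq_emod_of_pos (by omega)] at hp; exact hp
    have : n.toNat = 2 * (PySem.Int.floordiv n 2).toNat := by rw [hfd]; omega
    rw [this]
  | case3 n h hp ih =>
    intro hn
    rw [mersenne_step n h, if_neg hp, mersenne_t_eq n h ih]
    have hfd : PySem.Int.floordiv n 2 = n / 2 := PySem.Int.floordiv_eq_ediv_of_pos (by omega)
    have hp' : n % 2 = 1 := by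
      rw [PySem.Int.mod_eq_emod_of_pos (by omega)] at hp; omega
    have hnt : n.toNat = 2 * (PySem.Int.floordiv n 2).toNat + 1 := by rw [hfd]; omega
    have hm : ((2 : Int) ^ (2 * (PySem.Int.floordiv n 2).toNat) - 1) % 1000000007
        ≡ 2 ^ (2 * (PySem.Int.floordiv n 2).toNat) - 1 [ZMOD 1000000007] :=
      Int.emod_emod_of_dvd _ dvd_rfl
    have h1 : (2 : Int) * ((2 ^ (2 * (PySem.Int.floordiv n 2).toNat) - 1) % 1000000007) + 1
        ≡ 2 * (2 ^ (2 * (PySem.Int.floordiv n 2).toNat) - 1) + 1 [ZMOD 1000000007] :=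
      (hm.mul_left 2).add_right 1
    have h2 : (2 : Int) * (2 ^ (2 * (PySem.Int.floordiv n 2).toNat) - 1) + 1 = 2 ^ n.toNat - 1 := by
      rw [hnt, pow_succ]; ring
    rw [h2] at h1
    exact h1

-- ===== VERDICT (by name: the statement is the Claim_ definition above) =====
theorem calc_py_spec : Claim_equal_calc_py := by
  intro n _
  unfold Spec_calc_py calc_py calc_py_alt
  rw [calcLoop_eq, one_mul]
  by_cases h : n > 0
  · rw [if_pos h, mersenne_eq n (by omega)]
  · rw [if_neg h]
    have : n.toNat = 0 := by omega
    rw [this]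
    decide
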